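-- pv_equiv track=rewrite | github.com/logman117/Cluster_Semantic_Chunking_RAG | cluster_semantic_chunker.py | _get_pages_for_span
-- ===== SOURCE A (Python) =====
-- from typing import List, Dict, Tuple, Optional, Callable, Any, Set
--
-- def _get_pages_for_span(start_pos: int, end_pos: int, page_boundaries: Dict[int, int]) -> List[int]:
--     """
--     Determine which pages a text span covers based on character positions.
--
--     Args:
--         start_pos: Starting character position in the document
--         end_pos: Ending character position in the document
--         page_boundaries: Dictionary mapping character positions to page numbers
--
--     Returns:
--         List of page numbers that this span covers
--     """
--     pages = set()
--     # Find the page for start position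
--     for pos, page_num in sorted(page_boundaries.items()):
--         if pos > start_pos:
--             # Add the previous page (where the span starts)
--             pages.add(page_boundaries.get(max(k for k in page_boundaries.keys() if k <= start_pos), 1))
--             break
--
--     # Find pages between start and end
--     for pos, page_num in sorted(page_boundaries.items()):
--         if start_pos <= pos <= end_pos:
--             pages.add(page_num)
--         if pos > end_pos:
--             break
--
--     # If no pages found, default to page 1
--     if not pages:
--         pages.add(1)
--
--     return sorted(list(pages))
-- ===== SOURCE B (Python) =====
-- from typing import List, Dict
--
--
-- def _get_pages_for_span(start_pos: int, end_pos: int, page_boundaries: Dict[int, int]) -> List[int]: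
--     """Single linear pass: collect pages whose boundary lies in the span, plus the
--     floor page (largest boundary <= start_pos) when some boundary lies past start_pos."""
--     pages = {p for pos, p in page_boundaries.items() if start_pos <= pos <= end_pos}
--     has_greater = False
--     floor_key = None
--     floor_page = None
--     for pos, p in page_boundaries.items():
--         if pos > start_pos:
--             has_greater = True
--         elif floor_key is None or pos > floor_key:
--             floor_key, floor_page = pos, p
--     if has_greater and floor_key is not None:
--         pages.add(floor_page)
--     return sorted(pages) if pages else [1]
-- ===== Notes on version B (the rewrite author's own statement) =====
-- stated objective: faster
-- what changed: B replaces A's two scans over sorted(items) plus a max-generator (O(n log n)) by a single linear pass that tracks the floor boundary (largest key <= start_pos) and collects in-span pages, sorting only the small result set.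
import Mathlib
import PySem

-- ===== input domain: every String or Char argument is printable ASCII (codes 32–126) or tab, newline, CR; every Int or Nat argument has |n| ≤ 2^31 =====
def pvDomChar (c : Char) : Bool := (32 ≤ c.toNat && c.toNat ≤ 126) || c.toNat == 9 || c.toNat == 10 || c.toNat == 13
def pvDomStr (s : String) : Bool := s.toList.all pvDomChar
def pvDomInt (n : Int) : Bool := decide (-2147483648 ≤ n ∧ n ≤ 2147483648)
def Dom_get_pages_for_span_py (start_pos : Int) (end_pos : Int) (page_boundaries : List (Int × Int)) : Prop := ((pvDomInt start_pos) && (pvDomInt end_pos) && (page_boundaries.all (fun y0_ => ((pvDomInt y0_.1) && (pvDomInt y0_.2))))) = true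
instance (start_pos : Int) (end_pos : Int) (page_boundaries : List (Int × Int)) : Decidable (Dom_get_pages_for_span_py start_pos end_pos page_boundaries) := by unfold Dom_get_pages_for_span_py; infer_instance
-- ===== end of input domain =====

-- B replaces A's two passes over sorted(items) (each O(n log n), plus a max-scan) by one
-- linear pass that tracks the floor boundary and in-span pages directly; only the small
-- set of result pages is sorted at the end.

-- ===== PORT A =====
-- A's expression 'page_boundaries.get(max(k for k in page_boundaries.keys() if k <= start_pos), 1)'.
-- 'max' over an empty generator raises ValueError in Python: Pre_ excludes exactly that case;
-- the '.getD 1' on the Option is a placeholder never reached inside Pre_.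
def pvFloorA (start_pos : Int) (d : PySem.Dict Int Int) : Int :=
  d.getD ((PySem.List.max? (d.keys.filter (fun k => decide (k ≤ start_pos))) (fun k => k)).getD 1) 1

-- first 'for pos, page_num in sorted(...)' loop: add the floor page and break at the first pos > start_pos
def pvLoopA1 (start_pos : Int) (d : PySem.Dict Int Int) :
    List (Int × Int) → PySem.Set Int → PySem.Set Int
  | [], pages => pages
  | (pos, _) :: rest, pages =>
    if pos > start_pos then PySem.Set.add pages (pvFloorA start_pos d)
    else pvLoopA1 start_pos d rest pages

-- second loop: collect pages with start_pos <= pos <= end_pos, break once pos > end_pos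
def pvLoopA2 (start_pos end_pos : Int) :
    List (Int × Int) → PySem.Set Int → PySem.Set Int
  | [], pages => pages
  | (pos, page) :: rest, pages =>
    let pages' := if start_pos ≤ pos ∧ pos ≤ end_pos then PySem.Set.add pages page else pages
    if pos > end_pos then pages' else pvLoopA2 start_pos end_pos rest pages'

def get_pages_for_span_py (start_pos : Int) (end_pos : Int) (page_boundaries : List (Int × Int)) : List Int :=
  let d := PySem.Dict.ofList page_boundaries
  -- sorted(page_boundaries.items()): a dict's keys are distinct, so Python's lexicographic
  -- pair sort is exactly the (stable) sort by key
  let items := PySem.List.sorted d.items (fun p => p.1)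
  let pages := pvLoopA1 start_pos d items PySem.Set.empty
  let pages := pvLoopA2 start_pos end_pos items pages
  let pages := if pages.isEmpty then PySem.Set.add pages 1 else pages
  PySem.List.sorted pages (fun x => x)

-- ===== PORT B =====
-- B's single loop, state = (has_greater, floor item): floor = item with the largest key ≤ start_pos
def pvFloorB (start_pos : Int) :
    List (Int × Int) → Bool × Option (Int × Int) → Bool × Option (Int × Int)
  | [], acc => acc
  | (pos, p) :: rest, acc =>
    pvFloorB start_pos rest
      (if pos > start_pos then (true, acc.2)
       else match acc.2 with
         | none => (acc.1, some (pos, p))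
         | some q => if pos > q.1 then (acc.1, some (pos, p)) else acc)

def get_pages_for_span_py_alt (start_pos : Int) (end_pos : Int) (page_boundaries : List (Int × Int)) : List Int :=
  let d := PySem.Dict.ofList page_boundaries
  -- {p for pos, p in page_boundaries.items() if start_pos <= pos <= end_pos}
  let pages : PySem.Set Int :=
    PySem.Set.ofList ((d.items.filter (fun p => start_pos ≤ p.1 ∧ p.1 ≤ end_pos)).map (fun p => p.2))
  let st := pvFloorB start_pos d.items (false, none)
  let pages := match st with
    | (true, some q) => PySem.Set.add pages q.2
    | _ => pages
  if pages.isEmpty then [1] else PySem.List.sorted pages (fun x => x)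

-- ===== PRECONDITION & SPEC =====
-- Pre_ excludes exactly the inputs where A raises ValueError ('max' of an empty generator):
-- some boundary lies strictly past start_pos but none lies at or before it.
def Pre_get_pages_for_span_py (start_pos : Int) (end_pos : Int) (page_boundaries : List (Int × Int)) : Prop :=
  page_boundaries = [] ∨ ∃ p ∈ page_boundaries, p.1 ≤ start_pos
instance (start_pos : Int) (end_pos : Int) (page_boundaries : List (Int × Int)) : Decidable (Pre_get_pages_for_span_py start_pos end_pos page_boundaries) := by unfold Pre_get_pages_for_span_py; infer_instance

def pvWitness_get_pages_for_span_py : Int × Int × (List (Int × Int)) := (2, 5, [(0, 1), (4, 2)])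

def Spec_get_pages_for_span_py (start_pos : Int) (end_pos : Int) (page_boundaries : List (Int × Int)) (out : List Int) : Prop := out = get_pages_for_span_py_alt start_pos end_pos page_boundaries
instance (start_pos : Int) (end_pos : Int) (page_boundaries : List (Int × Int)) (out : List Int) : Decidable (Spec_get_pages_for_span_py start_pos end_pos page_boundaries out) := by unfold Spec_get_pages_for_span_py; infer_instance

-- ===== CLAIM (what is proved, stated in full; the proofs are below) =====
def Claim_equal_get_pages_for_span_py : Prop := ∀ (start_pos : Int) (end_pos : Int) (page_boundaries : List (Int × Int)), Dom_get_pages_for_span_py start_pos end_pos page_boundaries → Pre_get_pages_for_span_py start_pos end_pos page_boundaries → Spec_get_pages_for_span_py start_pos end_pos page_boundaries (get_pages_for_span_py start_pos end_pos page_boundaries)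

-- ===== LEMMAS AND PROOFS =====

lemma pv_keys_ofList (ps : List (Int × Int)) :
    (PySem.Dict.ofList ps).keys = PySem.Set.ofList (ps.map (·.1)) := by
  have h := PySem.Dict.keys_foldl_insert_key (ν := Int) ps (fun p => p.1) (fun _ p => p.2) PySem.Dict.empty
  simpa [PySem.Dict.ofList, PySem.Dict.update, PySem.Set.update_nil_left] using h

lemma pv_loopA1_mem (s : Int) (d : PySem.Dict Int Int) (l : List (Int × Int))
    (pages : PySem.Set Int) (a : Int) :
    a ∈ pvLoopA1 s d l pages ↔
      a ∈ pages ∨ ((∃ p ∈ l, s < p.1) ∧ a = pvFloorA s d) := by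
  induction l generalizing pages with
  | nil => simp [pvLoopA1]
  | cons hd tl ih =>
    obtain ⟨pos, pg⟩ := hd
    by_cases h : pos > s
    · simp [pvLoopA1, h, PySem.Set.mem_add]
    · simp only [pvLoopA1, if_neg h, ih]
      constructor
      · rintro (h1 | ⟨⟨p, hp, hps⟩, rfl⟩)
        · exact Or.inl h1
        · exact Or.inr ⟨⟨p, List.mem_cons_of_mem _ hp, hps⟩, rfl⟩
      · rintro (h1 | ⟨⟨p, hp, hps⟩, rfl⟩)
        · exact Or.inl h1
        · rcases List.mem_cons.mp hp with rfl | hp'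
          · exact absurd hps h
          · exact Or.inr ⟨⟨p, hp', hps⟩, rfl⟩

lemma pv_loopA1_nodup (s : Int) (d : PySem.Dict Int Int) (l : List (Int × Int))
    (pages : PySem.Set Int) (h : pages.Nodup) : (pvLoopA1 s d l pages).Nodup := by
  induction l generalizing pages with
  | nil => simpa [pvLoopA1]
  | cons hd tl ih =>
    obtain ⟨pos, pg⟩ := hd
    by_cases hc : pos > s
    · simpa [pvLoopA1, hc] using PySem.Set.nodup_add _ _ h
    · simpa [pvLoopA1, hc] using ih _ h

lemma pv_loopA2_mem (s e : Int) (l : List (Int × Int))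
    (hl : l.Pairwise (fun p q => p.1 ≤ q.1)) (pages : PySem.Set Int) (a : Int) :
    a ∈ pvLoopA2 s e l pages ↔
      a ∈ pages ∨ ∃ p ∈ l, (s ≤ p.1 ∧ p.1 ≤ e) ∧ p.2 = a := by
  induction l generalizing pages with
  | nil => simp [pvLoopA2]
  | cons hd tl ih =>
    obtain ⟨pos, pg⟩ := hd
    rcases List.pairwise_cons.mp hl with ⟨hhd, htl⟩
    by_cases hbrk : pos > e
    · have hnin : ¬ (s ≤ pos ∧ pos ≤ e) := by omega
      have htlno : ∀ p ∈ tl, ¬ ((s ≤ p.1 ∧ p.1 ≤ e) ∧ p.2 = a) := by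
        intro p hp
        have := hhd p hp
        simp only [not_and]
        intro hr _; omega
      simp only [pvLoopA2, if_neg hnin, if_pos hbrk]
      constructor
      · exact Or.inl
      · rintro (h1 | ⟨p, hp, hpr⟩)
        · exact h1
        · rcases List.mem_cons.mp hp with rfl | hp'
          · exact absurd hpr (by simp only [not_and]; intro hr _; omega)
          · exact absurd hpr (htlno p hp')
    · simp only [pvLoopA2, if_neg hbrk, ih htl]
      by_cases hin : s ≤ pos ∧ pos ≤ e
      · simp only [if_pos hin, PySem.Set.mem_add]
        constructor
        · rintro ((h1 | h1) | ⟨p, hp, hpr⟩)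
          · exact Or.inl h1
          · exact Or.inr ⟨(pos, pg), List.mem_cons_self, ⟨hin, h1.symm⟩⟩
          · exact Or.inr ⟨p, List.mem_cons_of_mem _ hp, hpr⟩
        · rintro (h1 | ⟨p, hp, hpr⟩)
          · exact Or.inl (Or.inl h1)
          · rcases List.mem_cons.mp hp with rfl | hp'
            · exact Or.inl (Or.inr hpr.2.symm)
            · exact Or.inr ⟨p, hp', hpr⟩
      · simp only [if_neg hin]
        constructor
        · rintro (h1 | ⟨p, hp, hpr⟩)
          · exact Or.inl h1
          · exact Or.inr ⟨p, List.mem_cons_of_mem _ hp, hpr⟩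
        · rintro (h1 | ⟨p, hp, hpr⟩)
          · exact Or.inl h1
          · rcases List.mem_cons.mp hp with rfl | hp'
            · exact absurd hpr.1 hin
            · exact Or.inr ⟨p, hp', hpr⟩

lemma pv_loopA2_nodup (s e : Int) (l : List (Int × Int))
    (pages : PySem.Set Int) (h : pages.Nodup) : (pvLoopA2 s e l pages).Nodup := by
  induction l generalizing pages with
  | nil => simpa [pvLoopA2]
  | cons hd tl ih =>
    obtain ⟨pos, pg⟩ := hd
    by_cases hin : s ≤ pos ∧ pos ≤ e
    · by_cases hbrk : pos > e
      · simp only [pvLoopA2, if_pos hin, if_pos hbrk]; exact PySem.Set.nodup_add _ _ h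
      · simp only [pvLoopA2, if_pos hin, if_neg hbrk]; exact ih _ (PySem.Set.nodup_add _ _ h)
    · by_cases hbrk : pos > e
      · simp only [pvLoopA2, if_neg hin, if_pos hbrk]; exact h
      · simp only [pvLoopA2, if_neg hin, if_neg hbrk]; exact ih _ h

lemma pv_floorB_fst (s : Int) (l : List (Int × Int)) (acc : Bool × Option (Int × Int)) :
    (pvFloorB s l acc).1 = (acc.1 || l.any (fun p => decide (s < p.1))) := by
  induction l generalizing acc with
  | nil => simp [pvFloorB]
  | cons hd tl ih =>
    obtain ⟨pos, pg⟩ := hd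
    rcases acc with ⟨b, o⟩
    by_cases h : pos > s
    · simp [pvFloorB, h, ih]
    · rcases o with _ | q0
      · simp [pvFloorB, h, ih]
      · by_cases h2 : pos > q0.1 <;> simp [pvFloorB, h, h2, ih]

lemma pv_floorB_snd_none (s : Int) (l : List (Int × Int)) (acc : Bool × Option (Int × Int)) :
    (pvFloorB s l acc).2 = none ↔ acc.2 = none ∧ ∀ p ∈ l, s < p.1 := by
  induction l generalizing acc with
  | nil => simp [pvFloorB]
  | cons hd tl ih =>
    obtain ⟨pos, pg⟩ := hd
    rcases acc with ⟨b, o⟩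
    by_cases h : pos > s
    · simp only [pvFloorB, if_pos h, ih, List.forall_mem_cons]
      constructor
      · rintro ⟨h1, h2⟩; exact ⟨h1, ⟨h, h2⟩⟩
      · rintro ⟨h1, _, h2⟩; exact ⟨h1, h2⟩
    · rcases o with _ | q0
      · simp only [pvFloorB, if_neg h, ih, List.forall_mem_cons]
        constructor
        · rintro ⟨h1, _⟩; exact absurd h1 (by simp)
        · rintro ⟨_, h1, _⟩; exact absurd h1 h
      · by_cases h2 : pos > q0.1
        · simp only [pvFloorB, if_neg h, if_pos h2, ih, List.forall_mem_cons]
          constructor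
          · rintro ⟨h3, _⟩; exact absurd h3 (by simp)
          · rintro ⟨_, h3, _⟩; exact absurd h3 h
        · simp only [pvFloorB, if_neg h, if_neg h2, ih, List.forall_mem_cons]
          constructor
          · rintro ⟨h3, _⟩; exact absurd h3 (by simp)
          · rintro ⟨_, h3, _⟩; exact absurd h3 h

lemma pv_floorB_snd_some (s : Int) (l : List (Int × Int)) (acc : Bool × Option (Int × Int))
    (hacc : ∀ q, acc.2 = some q → q.1 ≤ s) :
    ∀ q, (pvFloorB s l acc).2 = some q →
      (acc.2 = some q ∨ q ∈ l) ∧ q.1 ≤ s ∧ (∀ p ∈ l, p.1 ≤ s → p.1 ≤ q.1) ∧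
        (∀ q', acc.2 = some q' → q'.1 ≤ q.1) := by
  induction l generalizing acc with
  | nil => intro q hq; simp [pvFloorB] at hq; simp [hq, hacc q hq]
  | cons hd tl ih =>
    obtain ⟨pos, pg⟩ := hd
    rcases acc with ⟨b, o⟩
    intro q hq
    by_cases h : pos > s
    · simp only [pvFloorB, if_pos h] at hq
      obtain ⟨h1, h2, h3, h4⟩ := ih (true, o) hacc q hq
      refine ⟨?_, h2, ?_, h4⟩
      · rcases h1 with h1 | h1
        exacts [Or.inl h1, Or.inr (List.mem_cons_of_mem _ h1)]
      · intro p hp hps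
        rcases List.mem_cons.mp hp with rfl | hp'
        · omega
        · exact h3 p hp' hps
    · have hns : pos ≤ s := by omega
      rcases o with _ | q0
      · simp only [pvFloorB, if_neg h] at hq
        obtain ⟨h1, h2, h3, h4⟩ := ih (b, some (pos, pg))
          (by rintro q1 hq1; simp only [Option.some.injEq] at hq1; rw [← hq1]; exact hns) q hq
        refine ⟨?_, h2, ?_, by simp⟩
        · rcases h1 with h1 | h1
          · simp only [Option.some.injEq] at h1
            exact Or.inr (h1 ▸ List.mem_cons_self)
          · exact Or.inr (List.mem_cons_of_mem _ h1)
        · intro p hp hps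
          rcases List.mem_cons.mp hp with rfl | hp'
          · exact h4 (pos, pg) rfl
          · exact h3 p hp' hps
      · have hq0 : q0.1 ≤ s := hacc q0 rfl
        by_cases h2 : pos > q0.1
        · simp only [pvFloorB, if_neg h, if_pos h2] at hq
          obtain ⟨h1, h2', h3, h4⟩ := ih (b, some (pos, pg))
            (by rintro q1 hq1; simp only [Option.some.injEq] at hq1; rw [← hq1]; exact hns) q hq
          refine ⟨?_, h2', ?_, ?_⟩
          · rcases h1 with h1 | h1
            · simp only [Option.some.injEq] at h1
              exact Or.inr (h1 ▸ List.mem_cons_self)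
            · exact Or.inr (List.mem_cons_of_mem _ h1)
          · intro p hp hps
            rcases List.mem_cons.mp hp with rfl | hp'
            · exact h4 (pos, pg) rfl
            · exact h3 p hp' hps
          · rintro q' hq'
            simp only [Option.some.injEq] at hq'
            have := h4 (pos, pg) rfl
            rw [← hq']
            omega
        · simp only [pvFloorB, if_neg h, if_neg h2] at hq
          obtain ⟨h1, h2', h3, h4⟩ := ih (b, some q0) hacc q hq
          refine ⟨?_, h2', ?_, h4⟩
          · rcases h1 with h1 | h1
            exacts [Or.inl h1, Or.inr (List.mem_cons_of_mem _ h1)]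
          · intro p hp hps
            rcases List.mem_cons.mp hp with rfl | hp'
            · have := h4 q0 rfl; omega
            · exact h3 p hp' hps

-- Membership in A's final page set equals membership in B's, inside Pre_ (phrased on the dict).
lemma pv_sets_agree (s e : Int) (d : PySem.Dict Int Int) (hknd : d.keys.Nodup)
    (hpre : d.items = [] ∨ ∃ p ∈ d.items, p.1 ≤ s) (a : Int) :
    (a ∈ pvLoopA2 s e (PySem.List.sorted d.items (fun p => p.1))
        (pvLoopA1 s d (PySem.List.sorted d.items (fun p => p.1)) PySem.Set.empty) ↔
      a ∈ (match pvFloorB s d.items (false, none) with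
        | (true, some q) =>
            PySem.Set.add (PySem.Set.ofList ((d.items.filter
              (fun p : Int × Int => s ≤ p.1 ∧ p.1 ≤ e)).map (fun p : Int × Int => p.2))) q.2
        | _ => PySem.Set.ofList ((d.items.filter
              (fun p : Int × Int => s ≤ p.1 ∧ p.1 ≤ e)).map (fun p : Int × Int => p.2)))) := by
  have hpair : (PySem.List.sorted d.items (fun p => p.1)).Pairwise (fun p q => p.1 ≤ q.1) :=
    PySem.List.sorted_pairwise d.items (fun p => p.1)
  rw [pv_loopA2_mem s e _ hpair, pv_loopA1_mem]
  have hrange : (∃ p ∈ PySem.List.sorted d.items (fun p => p.1), (s ≤ p.1 ∧ p.1 ≤ e) ∧ p.2 = a) ↔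
      a ∈ PySem.Set.ofList ((d.items.filter
        (fun p : Int × Int => s ≤ p.1 ∧ p.1 ≤ e)).map (fun p : Int × Int => p.2)) := by
    simp only [PySem.Set.mem_ofList, List.mem_map, List.mem_filter,
      PySem.List.mem_sorted, decide_eq_true_eq]
    constructor
    · rintro ⟨p, hp, hr, rfl⟩; exact ⟨p, ⟨hp, hr⟩, rfl⟩
    · rintro ⟨p, ⟨hp, hr⟩, rfl⟩; exact ⟨p, hp, hr, rfl⟩
  have hfst : (pvFloorB s d.items (false, none)).1 =
      d.items.any (fun p => decide (s < p.1)) := by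
    simpa using pv_floorB_fst s d.items (false, none)
  by_cases hg : ∃ p ∈ d.items, s < p.1
  · -- some boundary lies past start_pos: both sides add the floor page
    have hle : ∃ p ∈ d.items, p.1 ≤ s := by
      rcases hpre with hnil | hex
      · rcases hg with ⟨p, hp, _⟩; rw [hnil] at hp; simp at hp
      · exact hex
    have hfst' : (pvFloorB s d.items (false, none)).1 = true := by
      rw [hfst]; simp only [List.any_eq_true, decide_eq_true_eq]; exact hg
    have hsnd : (pvFloorB s d.items (false, none)).2 ≠ none := by
      rw [Ne, pv_floorB_snd_none]
      rintro ⟨_, hall⟩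
      rcases hle with ⟨p, hp, hps⟩
      exact absurd (hall p hp) (by omega)
    rcases hsndv : (pvFloorB s d.items (false, none)).2 with _ | q
    · exact absurd hsndv hsnd
    · obtain ⟨hq1, hq2, hq3, _⟩ :=
        pv_floorB_snd_some s d.items (false, none) (by simp) q hsndv
      have hqmem : q ∈ d.items := by
        rcases hq1 with h1 | h1
        · simp at h1
        · exact h1
      -- A's floor value is exactly the page of B's floor item
      have hfeq : pvFloorA s d = q.2 := by
        have hqk : q.1 ∈ d.keys.filter (fun k => decide (k ≤ s)) := by
          simp only [List.mem_filter, decide_eq_true_eq]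
          exact ⟨List.mem_map.mpr ⟨q, hqmem, rfl⟩, hq2⟩
        rcases hmx : PySem.List.max? (d.keys.filter (fun k => decide (k ≤ s))) (fun k => k)
          with _ | m
        · rw [PySem.List.max?_eq_none_iff] at hmx
          rw [hmx] at hqk; simp at hqk
        · have hmmem := PySem.List.max?_mem hmx
          simp only [List.mem_filter, decide_eq_true_eq] at hmmem
          rcases List.mem_map.mp hmmem.1 with ⟨pm, hpm, hpm1⟩
          have hmax : q.1 ≤ m := PySem.List.max?_isMax hmx q.1 hqk
          have hmle : m ≤ q.1 := by
            have := hq3 pm hpm (by rw [hpm1]; exact hmmem.2)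
            omega
          have hmq : m = q.1 := le_antisymm hmle hmax
          unfold pvFloorA
          rw [hmx, Option.getD_some, hmq]
          exact PySem.Dict.getD_of_mem_items d hqmem hknd 1
      rcases hstv : pvFloorB s d.items (false, none) with ⟨b, o⟩
      simp only [hstv] at hfst' hsndv
      subst hfst'
      subst hsndv
      dsimp only
      simp only [PySem.Set.mem_add, ← hrange, hfeq]
      simp only [PySem.Set.empty, List.not_mem_nil, false_or, PySem.List.mem_sorted]
      constructor
      · rintro (⟨_, h⟩ | h)
        · exact Or.inr h
        · exact Or.inl h
      · rintro (h | h)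
        · exact Or.inr h
        · exact Or.inl ⟨hg, h⟩
  · -- no boundary past start_pos: neither side adds a floor page
    have hfst' : (pvFloorB s d.items (false, none)).1 = false := by
      rw [hfst]; simp only [List.any_eq_false, decide_eq_true_eq]
      intro p hp; exact fun h => hg ⟨p, hp, h⟩
    have hg' : ¬ ∃ p ∈ PySem.List.sorted d.items (fun p => p.1), s < p.1 := by
      simpa only [PySem.List.mem_sorted] using hg
    rcases hstv : pvFloorB s d.items (false, none) with ⟨b, o⟩
    simp only [hstv] at hfst'
    subst hfst'
    have hmatch : (match ((false, o) : Bool × Option (Int × Int)) with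
        | (true, some q) =>
            PySem.Set.add (PySem.Set.ofList ((d.items.filter
              (fun p : Int × Int => s ≤ p.1 ∧ p.1 ≤ e)).map (fun p : Int × Int => p.2))) q.2
        | _ => PySem.Set.ofList ((d.items.filter
              (fun p : Int × Int => s ≤ p.1 ∧ p.1 ≤ e)).map (fun p : Int × Int => p.2))) =
        PySem.Set.ofList ((d.items.filter
              (fun p : Int × Int => s ≤ p.1 ∧ p.1 ≤ e)).map (fun p : Int × Int => p.2)) := by
      rcases o with _ | q <;> rfl
    rw [hmatch, ← hrange]
    simp only [PySem.Set.empty, List.not_mem_nil, false_or]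
    constructor
    · rintro (⟨h1, _⟩ | h1)
      · exact absurd h1 hg'
      · exact h1
    · exact Or.inr

lemma pv_nodup_A (s e : Int) (d : PySem.Dict Int Int) (l : List (Int × Int)) :
    (pvLoopA2 s e l (pvLoopA1 s d l PySem.Set.empty)).Nodup :=
  pv_loopA2_nodup s e l _ (pv_loopA1_nodup s d l _ (by simp [PySem.Set.empty]))

lemma pv_final (SA SB : PySem.Set Int) (hA : SA.Nodup) (hB : SB.Nodup)
    (hmem : ∀ a, a ∈ SA ↔ a ∈ SB) :
    PySem.List.sorted (if SA.isEmpty then PySem.Set.add SA 1 else SA) (fun x => x) =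
      (if SB.isEmpty then [1] else PySem.List.sorted SB (fun x => x)) := by
  by_cases h : SA = []
  · have hSB : SB = [] := by
      rw [List.eq_nil_iff_forall_not_mem]
      intro x hx
      rw [List.eq_nil_iff_forall_not_mem] at h
      exact h x ((hmem x).mpr hx)
    subst h; subst hSB
    decide
  · have hSB : SB ≠ [] := by
      intro hSB
      apply h
      rw [List.eq_nil_iff_forall_not_mem] at hSB ⊢
      intro x hx
      exact hSB x ((hmem x).mp hx)
    rw [if_neg (by simpa [List.isEmpty_iff] using h),
      if_neg (by simpa [List.isEmpty_iff] using hSB)]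
    rw [PySem.List.sorted_id_eq_sorted_id_iff_perm]
    exact (List.perm_ext_iff_of_nodup hA hB).mpr hmem

-- ===== VERDICT (by name: the statement is the Claim_ definition above) =====
theorem get_pages_for_span_py_spec : Claim_equal_get_pages_for_span_py := by
  intro s e pbs _ hpre
  unfold Spec_get_pages_for_span_py get_pages_for_span_py get_pages_for_span_py_alt
  dsimp only
  have hknd : (PySem.Dict.ofList pbs).keys.Nodup := PySem.Dict.nodup_keys_ofList pbs
  have hpre' : (PySem.Dict.ofList pbs).items = [] ∨
      ∃ p ∈ (PySem.Dict.ofList pbs).items, p.1 ≤ s := by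
    rcases hpre with rfl | ⟨p, hp, hps⟩
    · exact Or.inl rfl
    · refine Or.inr ?_
      have hk : p.1 ∈ (PySem.Dict.ofList pbs).keys := by
        rw [pv_keys_ofList, PySem.Set.mem_ofList]
        exact List.mem_map.mpr ⟨p, hp, rfl⟩
      rcases List.mem_map.mp hk with ⟨q, hq, hq1⟩
      exact ⟨q, hq, by rw [hq1]; exact hps⟩
  have hnodB : (match pvFloorB s (PySem.Dict.ofList pbs).items (false, none) with
        | (true, some q) =>
            PySem.Set.add (PySem.Set.ofList (((PySem.Dict.ofList pbs).items.filter
              (fun p : Int × Int => s ≤ p.1 ∧ p.1 ≤ e)).map (fun p : Int × Int => p.2))) q.2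
        | _ => PySem.Set.ofList (((PySem.Dict.ofList pbs).items.filter
              (fun p : Int × Int => s ≤ p.1 ∧ p.1 ≤ e)).map (fun p : Int × Int => p.2))).Nodup := by
    rcases pvFloorB s (PySem.Dict.ofList pbs).items (false, none) with ⟨b, o⟩
    rcases b <;> rcases o with _ | q
    · exact PySem.Set.nodup_ofList _
    · exact PySem.Set.nodup_ofList _
    · exact PySem.Set.nodup_ofList _
    · exact PySem.Set.nodup_add _ _ (PySem.Set.nodup_ofList _)
  exact pv_final _ _ (pv_nodup_A s e (PySem.Dict.ofList pbs) _) hnodB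
    (pv_sets_agree s e (PySem.Dict.ofList pbs) hknd hpre')
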